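-- pv_equiv track=rewrite | github.com/vanish52248/sandbox | 02_coder/01_AtCoder/01_Past_ABC/ABC186/C.py | base_eight
-- ===== SOURCE A (Python) =====
-- def base_eight(num):
--     s = ""
--     while num > 0:
--         s = str(num%8) + s
--         num //= 8
--     if "7" in s:
--         return True
--     else:
--         return False
-- ===== SOURCE B (Python) =====
-- def base_eight(num):
--     while num > 0:
--         if num % 8 == 7:
--             return True
--         num //= 8
--     return False
-- ===== Notes on version B (the rewrite author's own statement) =====
-- stated objective: simpler
-- what changed: Replaces A's two-phase build-the-whole-octal-string-then-substring-search with a single early-exiting loop that tests each octal digit directly as it is produced, keeping no intermediate representation.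
import Mathlib
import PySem

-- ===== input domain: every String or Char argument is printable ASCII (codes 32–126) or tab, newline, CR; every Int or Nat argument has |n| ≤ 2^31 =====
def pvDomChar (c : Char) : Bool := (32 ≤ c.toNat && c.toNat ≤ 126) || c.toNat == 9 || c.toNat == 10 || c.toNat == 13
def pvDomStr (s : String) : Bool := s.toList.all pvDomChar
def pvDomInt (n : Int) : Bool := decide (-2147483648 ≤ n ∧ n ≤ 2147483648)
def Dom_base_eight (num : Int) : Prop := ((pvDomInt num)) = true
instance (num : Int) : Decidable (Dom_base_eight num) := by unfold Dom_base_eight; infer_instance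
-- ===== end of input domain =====

-- B drops A's build-base-8-string-then-search in favour of one early-exiting digit loop with no string accumulator (objective: simpler).

-- ===== PORT A =====
-- the while loop of A: prepend str(num % 8), num //= 8, until num ≤ 0
def baseEightLoopA (num : Int) (s : List Char) : List Char :=
  if _h : num > 0 then
    baseEightLoopA (PySem.Int.floordiv num 8) (PySem.Int.toChars (PySem.Int.mod num 8) ++ s)
  else s
termination_by num.toNat
decreasing_by
  rw [PySem.Int.floordiv_eq_ediv_of_pos (by omega)]
  omega

def base_eight (num : Int) : Bool :=
  let s := baseEightLoopA num []
  if PySem.Chars.isIn "7".toList s then true else false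

-- ===== PORT B =====
def base_eight_alt (num : Int) : Bool :=
  if _h : num > 0 then
    if PySem.Int.mod num 8 == 7 then true else base_eight_alt (PySem.Int.floordiv num 8)
  else false
termination_by num.toNat
decreasing_by
  rw [PySem.Int.floordiv_eq_ediv_of_pos (by omega)]
  omega

-- ===== PRECONDITION & SPEC =====
def Spec_base_eight (num : Int) (out : Bool) : Prop := out = base_eight_alt num
instance (num : Int) (out : Bool) : Decidable (Spec_base_eight num out) := by unfold Spec_base_eight; infer_instance

-- ===== CLAIM (what is proved, stated in full; the proofs are below) =====
def Claim_equal_base_eight : Prop := ∀ (num : Int), Dom_base_eight num → Spec_base_eight num (base_eight num)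

-- ===== LEMMAS AND PROOFS =====

lemma mem_toChars_digit (d : Int) (h1 : 0 ≤ d) (h2 : d < 8) :
    ('7' ∈ PySem.Int.toChars d) ↔ d = 7 := by
  interval_cases d <;> decide

lemma loopA_mem (num : Int) (s : List Char) :
    ('7' ∈ baseEightLoopA num s) ↔ (base_eight_alt num = true ∨ '7' ∈ s) := by
  induction num, s using baseEightLoopA.induct with
  | case1 num s h ih =>
    rw [baseEightLoopA, dif_pos h, ih]
    conv_rhs => rw [base_eight_alt, dif_pos h]
    have hd : ('7' ∈ PySem.Int.toChars (PySem.Int.mod num 8)) ↔ PySem.Int.mod num 8 = 7 :=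
      mem_toChars_digit _ (by rw [PySem.Int.mod_eq_emod_of_pos (by omega)]; omega)
        (by rw [PySem.Int.mod_eq_emod_of_pos (by omega)]; omega)
    simp only [List.mem_append, hd, beq_iff_eq]
    by_cases hm : PySem.Int.mod num 8 = 7
    · simp [hm]; tauto
    · simp [hm]; tauto
  | case2 num s h =>
    rw [baseEightLoopA, dif_neg h]
    conv_rhs => rw [base_eight_alt, dif_neg h]
    simp

-- ===== VERDICT (by name: the statement is the Claim_ definition above) =====
theorem base_eight_spec : Claim_equal_base_eight := by
  intro num _
  show base_eight num = base_eight_alt num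
  have h7 : ('7' ∈ baseEightLoopA num []) ↔ (base_eight_alt num = true) := by
    simpa using loopA_mem num []
  unfold base_eight
  rcases Bool.eq_false_or_eq_true (base_eight_alt num) with hb | hb <;>
    simp_all [PySem.Chars.isIn_iff_infix, List.singleton_infix_iff]
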